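-- pv_equiv track=rewrite | github.com/amaozhao/epubox | engine/agents/aligner.py | _adjust_boundary
-- ===== SOURCE A (Python) =====
-- BOUNDARIES = ' \t\n\r.,;:!?，。；：？！'
--
-- def _adjust_boundary(text: str, pos: int) -> int:
--     if pos <= 0:
--         return 0
--     if pos >= len(text):
--         return len(text)
--     if text[pos] in BOUNDARIES:
--         return pos
--     left = pos
--     while left > 0 and text[left] not in BOUNDARIES:
--         left -= 1
--     right = pos
--     while right < len(text) and text[right] not in BOUNDARIES:
--         right += 1
--     return left if pos - left <= right - pos else right
-- ===== SOURCE B (Python) =====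
-- BOUNDARIES = ' \t\n\r.,;:!?，。；：？！'
--
-- def _adjust_boundary(text, pos):
--     n = len(text)
--     if pos <= 0:
--         return 0
--     if pos >= n:
--         return n
--     if text[pos] in BOUNDARIES:
--         return pos
--     # single outward scan: at each distance d try the left candidate first
--     # (so equal-distance ties go left), then the right one; index 0 and n
--     # count as implicit boundaries.
--     for d in range(1, pos + 1):
--         l = pos - d
--         if l == 0 or text[l] in BOUNDARIES:
--             return l
--         r = pos + d
--         if r <= n and (r == n or text[r] in BOUNDARIES):
--             return r
--     return 0  # unreachable: at d == pos, l == 0 returns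
-- ===== Notes on version B (the rewrite author's own statement) =====
-- stated objective: faster
-- what changed: Replaces the two separate directional while-loops plus a final distance comparison by a single outward scan over growing distance d that tries the left candidate before the right one, so it stops at the nearest boundary instead of always scanning both directions to completion.
import Mathlib
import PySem

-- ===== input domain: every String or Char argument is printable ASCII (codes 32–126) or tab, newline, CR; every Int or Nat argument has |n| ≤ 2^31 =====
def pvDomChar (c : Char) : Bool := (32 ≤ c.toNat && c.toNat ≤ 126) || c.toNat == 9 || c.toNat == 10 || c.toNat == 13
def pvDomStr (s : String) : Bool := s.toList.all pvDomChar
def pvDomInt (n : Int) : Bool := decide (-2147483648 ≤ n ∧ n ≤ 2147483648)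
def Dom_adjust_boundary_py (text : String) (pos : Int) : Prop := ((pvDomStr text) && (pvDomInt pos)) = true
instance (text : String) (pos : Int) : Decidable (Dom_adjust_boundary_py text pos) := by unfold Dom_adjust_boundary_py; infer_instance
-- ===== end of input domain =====

-- B replaces A's two directional while-loops plus a final distance comparison by a
-- single outward scan over growing distance (left tried before right), which stops at the nearest boundary (objective: faster; measured).

-- ===== PORT A =====
def pvBoundaries : List Char := " \t\n\r.,;:!?，。；：？！".toList

def pvIsB (c : Char) : Bool := pvBoundaries.contains c

-- `while left > 0 and text[left] not in BOUNDARIES: left -= 1`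
def pvLeftLoop (cs : List Char) : Nat → Nat
  | 0 => 0
  | l + 1 => if pvIsB (cs.getD (l + 1) ' ') then l + 1 else pvLeftLoop cs l

-- `while right < len(text) and text[right] not in BOUNDARIES: right += 1`
def pvRightLoop (cs : List Char) (r : Nat) : Nat :=
  if h : r < cs.length ∧ ¬ pvIsB (cs.getD r ' ') then pvRightLoop cs (r + 1) else r
  termination_by cs.length - r
  decreasing_by omega

def adjust_boundary_py (text : String) (pos : Int) : Int :=
  let cs := text.toList
  if pos ≤ 0 then 0
  else if pos ≥ (cs.length : Int) then (cs.length : Int)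
  else
    let p := pos.toNat
    if pvIsB (cs.getD p ' ') then pos
    else
      let l := pvLeftLoop cs p
      let r := pvRightLoop cs p
      if (p : Int) - l ≤ (r : Int) - p then (l : Int) else (r : Int)

-- ===== PORT B =====
-- outward scan: at distance d try left candidate, then right; d runs from 1 up
-- (d ≤ p is a totality guard: at d = p the left candidate is 0, which succeeds)
def pvSearch (cs : List Char) (p : Nat) (d : Nat) : Nat :=
  if hd : d ≤ p then
    let l := p - d
    if l = 0 ∨ pvIsB (cs.getD l ' ') then l
    else
      let r := p + d
      if r = cs.length ∨ (r < cs.length ∧ pvIsB (cs.getD r ' ')) then r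
      else pvSearch cs p (d + 1)
  else 0
  termination_by p - d
  decreasing_by omega

def adjust_boundary_py_alt (text : String) (pos : Int) : Int :=
  let cs := text.toList
  if pos ≤ 0 then 0
  else if pos ≥ (cs.length : Int) then (cs.length : Int)
  else
    let p := pos.toNat
    if pvIsB (cs.getD p ' ') then pos
    else (pvSearch cs p 1 : Int)

-- ===== PRECONDITION & SPEC =====
def Spec_adjust_boundary_py (text : String) (pos : Int) (out : Int) : Prop := out = adjust_boundary_py_alt text pos
instance (text : String) (pos : Int) (out : Int) : Decidable (Spec_adjust_boundary_py text pos out) := by unfold Spec_adjust_boundary_py; infer_instance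

-- ===== CLAIM (what is proved, stated in full; the proofs are below) =====
def Claim_equal_adjust_boundary_py : Prop := ∀ (text : String) (pos : Int), Dom_adjust_boundary_py text pos → Spec_adjust_boundary_py text pos (adjust_boundary_py text pos)

-- ===== LEMMAS AND PROOFS =====

theorem pvLeftLoop_le (cs : List Char) (l : Nat) : pvLeftLoop cs l ≤ l := by
  induction l with
  | zero => simp [pvLeftLoop]
  | succ k ih =>
    rw [pvLeftLoop]
    split
    · exact le_refl _
    · omega

theorem pvLeftLoop_stop (cs : List Char) (l : Nat) :
    pvLeftLoop cs l = 0 ∨ pvIsB (cs.getD (pvLeftLoop cs l) ' ') := by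
  induction l with
  | zero => simp [pvLeftLoop]
  | succ k ih =>
    rw [pvLeftLoop]
    split
    · right; assumption
    · exact ih

theorem pvLeftLoop_max (cs : List Char) (l k : Nat) (h1 : pvLeftLoop cs l < k) (h2 : k ≤ l) :
    ¬ pvIsB (cs.getD k ' ') := by
  induction l with
  | zero => omega
  | succ m ih =>
    rw [pvLeftLoop] at h1
    split at h1
    · omega
    · rcases Nat.lt_or_ge k (m + 1) with hk | hk
      · exact ih h1 (by omega)
      · have : k = m + 1 := by omega
        subst this; assumption

theorem pvRightLoop_ge (cs : List Char) (r : Nat) : r ≤ pvRightLoop cs r := by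
  rw [pvRightLoop]
  split
  · have := pvRightLoop_ge cs (r + 1); omega
  · exact le_refl _
  termination_by cs.length - r
  decreasing_by rename_i h; omega

theorem pvRightLoop_le (cs : List Char) (r : Nat) (h : r ≤ cs.length) :
    pvRightLoop cs r ≤ cs.length := by
  rw [pvRightLoop]
  split
  · rename_i hh; exact pvRightLoop_le cs (r + 1) (by omega)
  · exact h
  termination_by cs.length - r
  decreasing_by rename_i h _; omega

theorem pvRightLoop_stop (cs : List Char) (r : Nat) :
    pvRightLoop cs r = cs.length ∨ pvIsB (cs.getD (pvRightLoop cs r) ' ') ∨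
      cs.length < pvRightLoop cs r := by
  rw [pvRightLoop]
  split
  · exact pvRightLoop_stop cs (r + 1)
  · rename_i h
    by_cases hr : r < cs.length
    · right; left
      by_contra hb
      exact h ⟨hr, hb⟩
    · by_cases he : r = cs.length
      · left; exact he
      · right; right; omega
  termination_by cs.length - r
  decreasing_by rename_i h; omega

theorem pvRightLoop_min (cs : List Char) (r k : Nat) (h1 : r ≤ k) (h2 : k < pvRightLoop cs r) :
    ¬ pvIsB (cs.getD k ' ') := by
  rw [pvRightLoop] at h2
  split at h2
  · rename_i h
    rcases Nat.lt_or_ge r k with hk | hk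
    · exact pvRightLoop_min cs (r + 1) k (by omega) h2
    · have : k = r := by omega
      subst this; exact h.2
  · omega
  termination_by cs.length - r
  decreasing_by rename_i h _; omega

-- main invariant: if no candidate exists at distance < d on either side, the
-- outward scan returns the nearer of the two loop results (left on ties)
theorem pvSearch_eq (cs : List Char) (p d : Nat)
    (hp : p < cs.length) (hd1 : 1 ≤ d)
    (hl : d ≤ p - pvLeftLoop cs p) (hr : d ≤ pvRightLoop cs p - p)
    (hlp : pvLeftLoop cs p ≤ p) (hrp : p ≤ pvRightLoop cs p) :
    pvSearch cs p d =
      (if p - pvLeftLoop cs p ≤ pvRightLoop cs p - p then pvLeftLoop cs p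
       else pvRightLoop cs p) := by
  have hrlen : pvRightLoop cs p ≤ cs.length := pvRightLoop_le cs p (by omega)
  rw [pvSearch]
  have hdp : d ≤ p := by omega
  rw [dif_pos hdp]
  by_cases hlc : p - d = 0 ∨ pvIsB (cs.getD (p - d) ' ')
  · rw [if_pos hlc]
    -- the left candidate fires: it must be exactly pvLeftLoop cs p
    have hle : pvLeftLoop cs p = p - d := by
      by_cases h : pvLeftLoop cs p < p - d
      · exfalso
        rcases hlc with h0 | hb
        · omega
        · exact pvLeftLoop_max cs p (p - d) h (by omega) hb
      · omega
    rw [if_pos (by omega)]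
    omega
  · rw [if_neg hlc]
    -- no left hit at distance d, so d < dl
    have hdl : d < p - pvLeftLoop cs p := by
      rcases Nat.lt_or_ge d (p - pvLeftLoop cs p) with h | h
      · exact h
      · exfalso
        have : pvLeftLoop cs p = p - d := by omega
        rcases pvLeftLoop_stop cs p with h0 | hb
        · exact hlc (Or.inl (by omega))
        · exact hlc (Or.inr (this ▸ hb))
    by_cases hrc : p + d = cs.length ∨ (p + d < cs.length ∧ pvIsB (cs.getD (p + d) ' '))
    · rw [if_pos hrc]
      -- the right candidate fires: it must be exactly pvRightLoop cs p
      have hre : pvRightLoop cs p = p + d := by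
        by_cases h : p + d < pvRightLoop cs p
        · exfalso
          have hb := pvRightLoop_min cs p (p + d) (by omega) h
          rcases hrc with h0 | ⟨_, hbb⟩
          · omega
          · exact hb hbb
        · omega
      rw [if_neg (by omega)]
      omega
    · rw [if_neg hrc]
      -- no right hit at distance d either, so d < dr
      have hdr : d < pvRightLoop cs p - p := by
        rcases Nat.lt_or_ge d (pvRightLoop cs p - p) with h | h
        · exact h
        · exfalso
          have heq : pvRightLoop cs p = p + d := by omega
          rcases pvRightLoop_stop cs p with h0 | hb | hg
          · exact hrc (Or.inl (by omega))
          · exact hrc (Or.inr ⟨by omega, heq ▸ hb⟩)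
          · omega
      exact pvSearch_eq cs p (d + 1) hp (by omega) (by omega) (by omega) hlp hrp
  termination_by p - d
  decreasing_by omega

-- ===== VERDICT (by name: the statement is the Claim_ definition above) =====
theorem adjust_boundary_py_spec : Claim_equal_adjust_boundary_py := by
  intro text pos _
  unfold Spec_adjust_boundary_py adjust_boundary_py adjust_boundary_py_alt
  set cs := text.toList with hcs
  by_cases h0 : pos ≤ 0
  · simp [h0]
  · rw [if_neg h0, if_neg h0]
    by_cases h1 : pos ≥ (cs.length : Int)
    · rw [if_pos h1, if_pos h1]
    · rw [if_neg h1, if_neg h1]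
      set p := pos.toNat with hpn
      have hp0 : 0 < p := by omega
      have hpl : p < cs.length := by omega
      by_cases h2 : pvIsB (cs.getD p ' ')
      · rw [if_pos h2, if_pos h2]
      · rw [if_neg h2, if_neg h2]
        -- left loop result is strictly below p, right loop strictly above
        have hlp : pvLeftLoop cs p < p := by
          obtain ⟨m, hm⟩ : ∃ m, p = m + 1 := ⟨p - 1, by omega⟩
          rw [hm, pvLeftLoop, if_neg (hm ▸ h2)]
          have := pvLeftLoop_le cs m; omega
        have hrp : p < pvRightLoop cs p := by
          rw [pvRightLoop, dif_pos ⟨hpl, h2⟩]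
          have := pvRightLoop_ge cs (p + 1); omega
        rw [pvSearch_eq cs p 1 hpl (le_refl _) (by omega) (by omega) (by omega) (by omega)]
        show (if (p : Int) - (pvLeftLoop cs p) ≤ ((pvRightLoop cs p : Int)) - p
              then ((pvLeftLoop cs p : Int)) else ((pvRightLoop cs p : Int))) = _
        split <;> rename_i hcmp <;> split <;> rename_i hcmp2 <;> omega
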